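-- pv_equiv track=rewrite | github.com/acrossthesnow/TitleForge | src/titleforge/plex_paths.py | truncate_title
-- ===== SOURCE A (Python) =====
-- TITLE_MAX_LENGTH = 150
--
-- def truncate_title(title: str, limit: int = TITLE_MAX_LENGTH) -> str:
--     if len(title) <= limit:
--         return title
--     words = title.split()
--     out: list[str] = []
--     n = 0
--     for w in words:
--         if n + len(w) + (1 if out else 0) >= limit:
--             break
--         out.append(w)
--         n += len(w) + (1 if out else 0)
--     return " ".join(out) if out else title[:limit]
-- ===== SOURCE B (Python) =====
-- TITLE_MAX_LENGTH = 150
--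
-- def truncate_title(title: str, limit: int = TITLE_MAX_LENGTH) -> str:
--     if len(title) <= limit:
--         return title
--     words = title.split()
--     joined = []                      # joined[i] = len(" ".join(words[:i+1]))
--     total = -1
--     for w in words:
--         total += len(w) + 1
--         joined.append(total)
--     # binary search (joined is strictly increasing): largest m with joined[m-1] <= limit
--     lo, hi = 0, len(joined)
--     while lo < hi:
--         mid = (lo + hi) // 2
--         if joined[mid] <= limit:
--             lo = mid + 1
--         else:
--             hi = mid
--     return " ".join(words[:lo]) if lo else title[:limit]
-- ===== Notes on version B (the rewrite author's own statement) =====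
-- stated objective: alternative
-- what changed: B keeps the longest word prefix whose joined length fits within limit, computed via a prefix-sum table of joined lengths plus a binary search for the cut point, instead of A's greedy accumulator loop whose leftover '+1' after the first word makes it drop words that still fit.
-- intended difference: On titles longer than limit where some word-prefix's joined length lands in A's dead zone (limit-1 or limit for two or more words; exactly limit for a single word when the title starts with whitespace), A drops a word (or every word) that still fits within limit because its accumulator charges a separator after the first word too; B returns the longest word prefix with joined length <= limit, the intended word-boundary truncation. — e.g. on truncate_title("ab cd ef", 6): A returns "ab", B returns "ab cd"
import Mathlib
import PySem

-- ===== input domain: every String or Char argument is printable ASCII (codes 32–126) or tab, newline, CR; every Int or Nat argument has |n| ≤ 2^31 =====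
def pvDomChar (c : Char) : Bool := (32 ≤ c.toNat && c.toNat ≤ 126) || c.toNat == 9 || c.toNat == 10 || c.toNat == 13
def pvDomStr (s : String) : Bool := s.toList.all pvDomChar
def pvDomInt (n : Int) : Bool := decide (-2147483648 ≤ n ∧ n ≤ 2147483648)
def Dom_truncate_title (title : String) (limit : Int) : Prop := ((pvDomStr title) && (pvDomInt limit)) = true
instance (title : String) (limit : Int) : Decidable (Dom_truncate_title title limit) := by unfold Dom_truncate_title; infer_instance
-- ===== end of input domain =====

-- B keeps the longest word prefix whose joined length fits within limit (prefix-sum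
-- table + binary search); A's greedy accumulator charges a separator after the first
-- word too, and on the boundary inputs described at D_ below B keeps words A drops.


-- ===== PORT A =====
-- the 'for w in words: … break' loop, state = (out, n)
def truncAloop (limit : Int) : List String → List String → Int → List String
  | [], out, _ => out
  | w :: ws, out, n =>
    if n + PySem.Str.len w + (if out = [] then 0 else 1) ≥ limit then out
    else truncAloop limit ws (out ++ [w]) (n + PySem.Str.len w + (if out ++ [w] = [] then 0 else 1))

def truncate_title (title : String) (limit : Int) : String :=
  if PySem.Str.len title ≤ limit then title
  else
    let words := PySem.Str.split₀ title
    let out := truncAloop limit words [] 0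
    if out ≠ [] then PySem.Str.join " " out else PySem.Str.slice title none (some limit)

-- ===== PORT B =====
-- Source B's first loop: joined[i] = len(" ".join(words[:i+1])), total starts at -1
def truncBjoined : List String → Int → List Int
  | [], _ => []
  | w :: ws, total => (total + PySem.Str.len w + 1) :: truncBjoined ws (total + PySem.Str.len w + 1)

-- Source B's 'while lo < hi' binary search, fuel = initial hi - lo (makes the loop structural;
-- fuel is never exhausted when called with fuel ≥ hi - lo)
def truncBsearch (j : List Int) (limit : Int) : Nat → Nat → Nat → Nat
  | 0, lo, _ => lo
  | fuel + 1, lo, hi =>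
    if lo < hi then
      if j.getD ((lo + hi) / 2) 0 ≤ limit then truncBsearch j limit fuel ((lo + hi) / 2 + 1) hi
      else truncBsearch j limit fuel lo ((lo + hi) / 2)
    else lo

def truncate_title_alt (title : String) (limit : Int) : String :=
  if PySem.Str.len title ≤ limit then title
  else
    let words := PySem.Str.split₀ title
    let joined := truncBjoined words (-1)
    let lo := truncBsearch joined limit joined.length 0 joined.length
    if lo ≠ 0 then PySem.Str.join " " (words.take lo) else PySem.Str.slice title none (some limit)

-- ===== PRECONDITION & SPEC =====
-- On titles longer than limit where some k+1-word prefix's joined length (sum of word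
-- lengths + k separators) lands in A's dead zone (limit-1 or limit for two or more
-- words; = limit for a single word when the title starts with whitespace), A drops a
-- word (or every word) that still fits within limit because its accumulator charges a
-- separator after the first word too; B returns the longest word prefix with joined
-- length ≤ limit, the intended word-boundary truncation.
def D_truncate_title (title : String) (limit : Int) : Prop :=
  limit < PySem.Str.len title ∧
  ∃ k < (PySem.Str.split₀ title).length,
    (((PySem.Str.split₀ title).take (k + 1)).map PySem.Str.len).sum + k
      ∈ Set.Icc (limit - min (k : Int) 1) limit ∧
    (k ≠ 0 ∨ PySem.Chars.isspace (title.toList.headD 'a') = true)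
instance (title : String) (limit : Int) : Decidable (D_truncate_title title limit) := by
  unfold D_truncate_title; simp only [Set.mem_Icc]; infer_instance

def Spec_truncate_title (title : String) (limit : Int) (out : String) : Prop :=
  ¬ D_truncate_title title limit → out = truncate_title_alt title limit
instance (title : String) (limit : Int) (out : String) : Decidable (Spec_truncate_title title limit out) := by
  unfold Spec_truncate_title; infer_instance

def pvDiffWitness_truncate_title : String × Int := ("ab cd ef", 6)
def pvDiffWitnessOut_truncate_title : String × String := ("ab", "ab cd")

-- ===== CLAIM =====
def Claim_unchanged_truncate_title : Prop := ∀ (title : String) (limit : Int), Dom_truncate_title title limit → Spec_truncate_title title limit (truncate_title title limit)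
def Claim_changed_truncate_title : Prop := Dom_truncate_title (pvDiffWitness_truncate_title.1) (pvDiffWitness_truncate_title.2) ∧ D_truncate_title (pvDiffWitness_truncate_title.1) (pvDiffWitness_truncate_title.2) ∧ truncate_title (pvDiffWitness_truncate_title.1) (pvDiffWitness_truncate_title.2) = pvDiffWitnessOut_truncate_title.1 ∧ truncate_title_alt (pvDiffWitness_truncate_title.1) (pvDiffWitness_truncate_title.2) = pvDiffWitnessOut_truncate_title.2 ∧ pvDiffWitnessOut_truncate_title.1 ≠ pvDiffWitnessOut_truncate_title.2
def Claim_exact_truncate_title : Prop := ∀ (title : String) (limit : Int), Dom_truncate_title title limit → D_truncate_title title limit → truncate_title title limit ≠ truncate_title_alt title limit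

-- ===== LEMMAS AND PROOFS =====

-- cumulative joined lengths of the word-length list; proofs only
def pvCuml : List Int → Int → List Int
  | [], _ => []
  | l :: ls, a => (a + l) :: pvCuml ls (a + l + 1)

theorem strLen_nonneg (s : String) : 0 ≤ PySem.Str.len s := by
  simp [PySem.Str.len]

-- A's greedy count in the non-first state (out ≠ []); proofs only
def gcnt (limit : Int) : List String → Int → Nat
  | [], _ => 0
  | w :: ws, n =>
    if n + PySem.Str.len w + 1 ≥ limit then 0
    else gcnt limit ws (n + PySem.Str.len w + 1) + 1

-- A's total greedy count (first word under the looser threshold); proofs only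
def gA (limit : Int) : List String → Nat
  | [] => 0
  | w :: ws => if PySem.Str.len w ≥ limit then 0 else gcnt limit ws (PySem.Str.len w + 1) + 1

theorem truncAloop_eq_take (limit : Int) :
    ∀ (ws : List String) (out : List String) (n : Int), out ≠ [] →
      truncAloop limit ws out n = out ++ ws.take (gcnt limit ws n) := by
  intro ws
  induction ws with
  | nil => intro out n _; simp [truncAloop, gcnt]
  | cons w ws ih =>
    intro out n hout
    simp only [truncAloop, gcnt, if_neg hout, if_neg (by simp : ¬(out ++ [w] = []))]
    split_ifs with h
    · simp
    · rw [ih (out ++ [w]) _ (by simp)]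
      simp [List.take_succ_cons]

theorem truncA_out (limit : Int) (words : List String) :
    truncAloop limit words [] 0 = words.take (gA limit words) := by
  cases words with
  | nil => simp [truncAloop, gA]
  | cons w ws =>
    have estep : truncAloop limit (w :: ws) [] 0
        = if 0 + PySem.Str.len w + 0 ≥ limit then []
          else truncAloop limit ws [w] (0 + PySem.Str.len w + 1) := rfl
    rw [estep, gA]
    simp only [zero_add, add_zero]
    split_ifs with hc
    · simp
    · rw [truncAloop_eq_take limit ws [w] _ (by simp)]
      simp [List.take_succ_cons]

theorem pvCuml_length : ∀ (ls : List Int) (a : Int), (pvCuml ls a).length = ls.length := by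
  intro ls; induction ls with
  | nil => intro a; simp [pvCuml]
  | cons l ls ih => intro a; simp [pvCuml, ih]

theorem pvCuml_mem_ge : ∀ (ls : List Int) (a x : Int), (∀ l ∈ ls, 0 ≤ l) →
    x ∈ pvCuml ls a → a ≤ x := by
  intro ls
  induction ls with
  | nil => intro a x _ hx; simp [pvCuml] at hx
  | cons l ls ih =>
    intro a x hnn hx
    have hl : 0 ≤ l := hnn l (by simp)
    simp only [pvCuml, List.mem_cons] at hx
    rcases hx with h | h
    · omega
    · have := ih (a + l + 1) x (fun y hy => hnn y (by simp [hy])) h; omega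

theorem pvCuml_pairwise : ∀ (ls : List Int) (a : Int), (∀ l ∈ ls, 0 ≤ l) →
    (pvCuml ls a).Pairwise (· < ·) := by
  intro ls
  induction ls with
  | nil => intro a _; simp [pvCuml]
  | cons l ls ih =>
    intro a hnn
    simp only [pvCuml, List.pairwise_cons]
    refine ⟨fun x hx => ?_, ih _ (fun y hy => hnn y (by simp [hy]))⟩
    have := pvCuml_mem_ge ls (a + l + 1) x (fun y hy => hnn y (by simp [hy])) hx
    omega

theorem pvCuml_getD : ∀ (ls : List Int) (a : Int) (k : Nat), k < ls.length →
    (pvCuml ls a).getD k 0 = a + (ls.take (k + 1)).sum + k := by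
  intro ls
  induction ls with
  | nil => intro a k hk; simp at hk
  | cons l ls ih =>
    intro a k hk
    cases k with
    | zero => simp [pvCuml]
    | succ k' =>
      simp only [pvCuml, List.getD_cons_succ, List.take_succ_cons, List.sum_cons]
      rw [ih (a + l + 1) k' (by simpa using hk)]
      push_cast
      ring

-- getD-monotonicity of a strictly increasing list
theorem pairwise_getD_mono (J : List Int) (hpw : J.Pairwise (· < ·)) {a b : Nat}
    (hab : a ≤ b) (hb : b < J.length) : J.getD a 0 ≤ J.getD b 0 := by
  rcases Nat.lt_or_ge a b with h | h
  · rw [List.pairwise_iff_getElem] at hpw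
    have := hpw a b (by omega) hb h
    rw [List.getD_eq_getElem _ _ (by omega), List.getD_eq_getElem _ _ hb]
    omega
  · have : a = b := by omega
    subst this; rfl

-- the filter count of a strictly increasing list is the largest fitting prefix
theorem filter_count_facts (limit : Int) :
    ∀ (J : List Int), J.Pairwise (· < ·) →
      (J.filter (fun x => decide (x ≤ limit))).length ≤ J.length ∧
      (∀ k, k < (J.filter (fun x => decide (x ≤ limit))).length → J.getD k 0 ≤ limit) ∧
      ((J.filter (fun x => decide (x ≤ limit))).length < J.length →
        limit < J.getD ((J.filter (fun x => decide (x ≤ limit))).length) 0) := by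
  intro J
  induction J with
  | nil => intro _; simp
  | cons x J ih =>
    intro hpw
    rw [List.pairwise_cons] at hpw
    obtain ⟨hx, hpw'⟩ := hpw
    obtain ⟨h1, h2, h3⟩ := ih hpw'
    by_cases hxl : x ≤ limit
    · rw [List.filter_cons_of_pos (by simpa using hxl)]
      refine ⟨by simpa using h1, fun k hk => ?_, fun hlt => ?_⟩
      · cases k with
        | zero => simpa using hxl
        | succ k' =>
          simp only [List.length_cons] at hk
          rw [List.getD_cons_succ]
          exact h2 k' (by omega)
      · simp only [List.length_cons] at hlt ⊢
        rw [List.getD_cons_succ]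
        exact h3 (by omega)
    · have hnil : J.filter (fun y => decide (y ≤ limit)) = [] := by
        rw [List.filter_eq_nil_iff]
        intro y hy
        have := hx y hy
        simp only [decide_eq_true_eq]
        omega
      rw [List.filter_cons_of_neg (by simpa using hxl), hnil]
      refine ⟨by simp, by simp, fun _ => ?_⟩
      simp only [List.length_nil, List.getD_cons_zero]
      omega

theorem truncBjoined_eq : ∀ (ws : List String) (t : Int),
    truncBjoined ws t = pvCuml (ws.map PySem.Str.len) (t + 1) := by
  intro ws
  induction ws with
  | nil => intro t; simp [truncBjoined, pvCuml]
  | cons w ws ih =>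
    intro t
    simp only [truncBjoined, List.map_cons, pvCuml, List.cons.injEq]
    exact ⟨by ring, by rw [ih]; ring_nf⟩

-- binary-search invariant: boundary facts propagate (fuel covers the interval)
theorem truncBsearch_spec (j : List Int) (limit : Int) :
    ∀ (fuel lo hi : Nat), hi - lo ≤ fuel → lo ≤ hi → hi ≤ j.length →
      (lo ≠ 0 → j.getD (lo - 1) 0 ≤ limit) → (hi < j.length → ¬ j.getD hi 0 ≤ limit) →
      lo ≤ truncBsearch j limit fuel lo hi ∧ truncBsearch j limit fuel lo hi ≤ hi ∧
      (truncBsearch j limit fuel lo hi ≠ 0 → j.getD (truncBsearch j limit fuel lo hi - 1) 0 ≤ limit) ∧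
      (truncBsearch j limit fuel lo hi < j.length → ¬ j.getD (truncBsearch j limit fuel lo hi) 0 ≤ limit) := by
  intro fuel
  induction fuel with
  | zero =>
    intro lo hi hfuel hle hlen hleft hright
    have : lo = hi := by omega
    subst this
    exact ⟨le_refl _, le_refl _, hleft, hright⟩
  | succ fuel ih =>
    intro lo hi hfuel hle hlen hleft hright
    rw [truncBsearch]
    split
    · next h =>
      split
      · next hmid =>
        have := ih ((lo + hi) / 2 + 1) hi (by omega) (by omega) hlen
          (fun _ => by simpa using hmid) hright
        exact ⟨by omega, this.2.1, this.2.2.1, this.2.2.2⟩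
      · next hmid =>
        have := ih lo ((lo + hi) / 2) (by omega) (by omega) (by omega)
          hleft (fun _ => hmid)
        exact ⟨this.1, by omega, this.2.2.1, this.2.2.2⟩
    · next h =>
      have : lo = hi := by omega
      subst this
      exact ⟨le_refl _, le_refl _, hleft, hright⟩

-- B's search over a strictly increasing table returns the filter count
theorem search_eq_count (J : List Int) (limit : Int) (hpw : J.Pairwise (· < ·)) :
    truncBsearch J limit J.length 0 J.length = (J.filter (fun x => decide (x ≤ limit))).length := by
  obtain ⟨hr0, hr1, hr2, hr3⟩ :=
    truncBsearch_spec J limit J.length 0 J.length (by omega) (by omega) (le_refl _)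
      (by simp) (by omega)
  set r := truncBsearch J limit J.length 0 J.length with hrdef
  obtain ⟨hf1, hf2, hf3⟩ := filter_count_facts limit J hpw
  set m := (J.filter (fun x => decide (x ≤ limit))).length with hmdef
  rcases Nat.lt_trichotomy r m with h | h | h
  · exact absurd (hf2 r h) (hr3 (by omega))
  · exact h
  · have h1 := hr2 (by omega)
    have h2 := hf3 (by omega)
    have h3 := pairwise_getD_mono J hpw (show m ≤ r - 1 by omega) (by omega)
    omega

-- greedy tail facts: A's non-first-state count against the cumulative table
theorem gcnt_facts (limit : Int) : ∀ (vs : List String) (n : Int),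
    gcnt limit vs n ≤ vs.length ∧
    (∀ k, k < gcnt limit vs n → (pvCuml (vs.map PySem.Str.len) n).getD k 0 ≤ limit - 2) ∧
    (gcnt limit vs n < vs.length → limit - 2 < (pvCuml (vs.map PySem.Str.len) n).getD (gcnt limit vs n) 0) := by
  intro vs
  induction vs with
  | nil => intro n; simp [gcnt]
  | cons v vs ih =>
    intro n
    obtain ⟨i1, i2, i3⟩ := ih (n + PySem.Str.len v + 1)
    rw [gcnt]
    simp only [List.map_cons, pvCuml]
    split_ifs with h
    · refine ⟨by simp, by simp, fun _ => ?_⟩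
      simp only [List.getD_cons_zero]
      omega
    · refine ⟨by simp only [List.length_cons]; omega, fun k hk => ?_, fun hlt => ?_⟩
      · cases k with
        | zero => simp only [List.getD_cons_zero]; omega
        | succ k' =>
          rw [List.getD_cons_succ]
          exact i2 k' (by omega)
      · rw [List.getD_cons_succ]
        exact i3 (by simp only [List.length_cons] at hlt; omega)

-- the core count equality outside D_'s dead zone
theorem counts_eq (limit : Int) (w : String) (ws : List String)
    (hD1 : (pvCuml ((w :: ws).map PySem.Str.len) 0).getD 0 0 ≠ limit)
    (hDk : ∀ k : Nat, 1 ≤ k → k < ws.length + 1 →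
      ¬(limit - 1 ≤ (pvCuml ((w :: ws).map PySem.Str.len) 0).getD k 0 ∧
        (pvCuml ((w :: ws).map PySem.Str.len) 0).getD k 0 ≤ limit)) :
    gA limit (w :: ws) = ((pvCuml ((w :: ws).map PySem.Str.len) 0).filter (fun j => decide (j ≤ limit))).length := by
  have hnn : ∀ l ∈ (w :: ws).map PySem.Str.len, 0 ≤ l := by
    intro l hl
    simp only [List.mem_map] at hl
    obtain ⟨s, _, rfl⟩ := hl
    exact strLen_nonneg s
  set J := pvCuml ((w :: ws).map PySem.Str.len) 0 with hJdef
  have hpw : J.Pairwise (· < ·) := pvCuml_pairwise _ 0 hnn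
  have hJlen : J.length = ws.length + 1 := by
    rw [hJdef, pvCuml_length]; simp
  have hJcons : J = (PySem.Str.len w) :: pvCuml (ws.map PySem.Str.len) (PySem.Str.len w + 1) := by
    rw [hJdef]
    simp only [List.map_cons, pvCuml, zero_add]
  obtain ⟨hf1, hf2, hf3⟩ := filter_count_facts limit J hpw
  set m := (J.filter (fun x => decide (x ≤ limit))).length with hmdef
  have hD2 : 2 ≤ m → J.getD (m - 1) 0 < limit - 1 := by
    intro hm2
    have hfit := hf2 (m - 1) (by omega)
    have := hDk (m - 1) (by omega) (by omega)
    omega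
  obtain ⟨t1, t2, t3⟩ := gcnt_facts limit ws (PySem.Str.len w + 1)
  set g' := gcnt limit ws (PySem.Str.len w + 1) with hg'def
  have hJget : ∀ k : Nat, J.getD (k + 1) 0
      = (pvCuml (ws.map PySem.Str.len) (PySem.Str.len w + 1)).getD k 0 := by
    intro k; rw [hJcons, List.getD_cons_succ]
  have hJ0 : J.getD 0 0 = PySem.Str.len w := by rw [hJcons]; simp
  rw [gA]
  split_ifs with hga
  · -- g = 0 : show m = 0
    by_contra hne
    have hm1 : 1 ≤ m := by omega
    have h0 := hf2 0 (by omega)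
    omega
  · -- g = g' + 1 ≥ 1
    -- g' + 1 ≤ m
    have hle1 : g' + 1 ≤ m := by
      by_contra hlt
      have hmlt : m < g' + 1 := by omega
      have hmJ : m < J.length := by rw [hJlen]; omega
      have := hf3 hmJ
      rcases Nat.eq_zero_or_pos m with hz | hp
      · rw [hz] at this
        omega
      · have hk : m - 1 < g' := by omega
        have : J.getD m 0 ≤ limit - 2 := by
          rw [show m = (m - 1) + 1 by omega, hJget (m - 1)]
          exact t2 (m - 1) hk
        omega
    -- m ≤ g' + 1
    have hle2 : m ≤ g' + 1 := by
      by_contra hlt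
      have hm2 : g' + 2 ≤ m := by omega
      have hglen : g' < ws.length := by
        have : m ≤ J.length := hf1
        rw [hJlen] at this
        omega
      have hrej := t3 hglen
      rw [← hJget g'] at hrej
      have hmono := pairwise_getD_mono J hpw (show g' + 1 ≤ m - 1 by omega)
        (show m - 1 < J.length by have := hf1; omega)
      have hmfit := hf2 (m - 1) (by omega)
      have hd2 := hD2 (by omega)
      omega
    omega

-- strict getD-monotonicity of a strictly increasing list
theorem pairwise_getD_strict (J : List Int) (hpw : J.Pairwise (· < ·)) {a b : Nat}
    (hab : a < b) (hb : b < J.length) : J.getD a 0 < J.getD b 0 := by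
  rw [List.pairwise_iff_getElem] at hpw
  have := hpw a b (by omega) hb hab
  rw [List.getD_eq_getElem _ _ (by omega), List.getD_eq_getElem _ _ hb]
  omega

-- ===== split₀ structural facts (inductions over PySem.Chars.split₀.go) =====

theorem split0_go_acc : ∀ (s cur : List Char) (acc : List (List Char)),
    PySem.Chars.split₀.go s cur acc = acc.reverse ++ PySem.Chars.split₀.go s cur [] := by
  intro s
  induction s with
  | nil =>
    intro cur acc
    simp only [PySem.Chars.split₀.go]
    split_ifs with h <;> simp
  | cons c rest ih =>
    intro cur acc
    simp only [PySem.Chars.split₀.go]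
    split_ifs with h1 h2
    · rw [ih [] acc]
    · rw [ih [] (cur.reverse :: acc), ih [] [cur.reverse]]
      simp
    · rw [ih (c :: cur) acc]

theorem split0_go_first : ∀ (s cur : List Char), cur ≠ [] →
    ∃ t, PySem.Chars.split₀.go s cur []
      = (cur.reverse ++ s.takeWhile (fun c => !PySem.Chars.isspace c)) :: t := by
  intro s
  induction s with
  | nil =>
    intro cur hcur
    refine ⟨[], ?_⟩
    simp only [PySem.Chars.split₀.go]
    rw [if_neg (by simpa [List.isEmpty_iff] using hcur)]
    simp
  | cons c rest ih =>
    intro cur hcur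
    simp only [PySem.Chars.split₀.go]
    by_cases hsp : PySem.Chars.isspace c = true
    · refine ⟨PySem.Chars.split₀.go rest [] [], ?_⟩
      rw [if_pos hsp, if_neg (by simpa [List.isEmpty_iff] using hcur),
        split0_go_acc rest [] [cur.reverse]]
      simp only [List.takeWhile_cons]
      rw [show (!PySem.Chars.isspace c) = false by simpa using hsp]
      simp
    · obtain ⟨t, ht⟩ := ih (c :: cur) (by simp)
      refine ⟨t, ?_⟩
      rw [if_neg hsp, ht]
      simp only [List.reverse_cons, List.takeWhile_cons]
      rw [show (!PySem.Chars.isspace c) = true by simpa using hsp]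
      simp

theorem split0_go_words : ∀ (s cur : List Char) (acc : List (List Char)),
    (∀ c ∈ cur, PySem.Chars.isspace c = false) →
    (∀ cw ∈ acc, cw ≠ [] ∧ ∀ c ∈ cw, PySem.Chars.isspace c = false) →
    ∀ cw ∈ PySem.Chars.split₀.go s cur acc, cw ≠ [] ∧ ∀ c ∈ cw, PySem.Chars.isspace c = false := by
  intro s
  induction s with
  | nil =>
    intro cur acc hcur hacc cw hcw
    simp only [PySem.Chars.split₀.go] at hcw
    split_ifs at hcw with h
    · exact hacc cw (by simpa using hcw)
    · simp only [List.mem_reverse, List.mem_cons] at hcw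
      rcases hcw with h1 | h1
      · subst h1
        refine ⟨by simpa using h, fun c hc => hcur c (by simpa using hc)⟩
      · exact hacc cw h1
  | cons c rest ih =>
    intro cur acc hcur hacc cw hcw
    simp only [PySem.Chars.split₀.go] at hcw
    split_ifs at hcw with h1 h2
    · exact ih [] acc (by simp) hacc cw hcw
    · refine ih [] (cur.reverse :: acc) (by simp) ?_ cw hcw
      intro cv hcv
      rcases List.mem_cons.mp hcv with h | h
      · subst h
        refine ⟨by simpa using h2, fun d hd => hcur d (by simpa using hd)⟩
      · exact hacc cv h
    · refine ih (c :: cur) acc ?_ hacc cw hcw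
      intro d hd
      rcases List.mem_cons.mp hd with h | h
      · subst h; simpa using h1
      · exact hcur d h

theorem split0_words (L : List Char) :
    ∀ cw ∈ PySem.Chars.split₀ L, cw ≠ [] ∧ ∀ c ∈ cw, PySem.Chars.isspace c = false := by
  intro cw hcw
  exact split0_go_words L [] [] (by simp) (by simp) cw hcw

theorem split0_first (c : Char) (rest : List Char) (h : PySem.Chars.isspace c = false) :
    ∃ t, PySem.Chars.split₀ (c :: rest)
      = ((c :: rest).takeWhile (fun c => !PySem.Chars.isspace c)) :: t := by
  have hstep : PySem.Chars.split₀ (c :: rest) = PySem.Chars.split₀.go rest [c] [] := by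
    simp only [PySem.Chars.split₀, PySem.Chars.split₀.go]
    rw [if_neg (by simp [h])]
  obtain ⟨t, ht⟩ := split0_go_first rest [c] (by simp)
  refine ⟨t, ?_⟩
  rw [hstep, ht]
  simp only [List.takeWhile_cons]
  rw [show (!PySem.Chars.isspace c) = true by simp [h]]
  simp

-- ===== join lengths =====

theorem cjoin_len : ∀ (ps : List (List Char)) (p : List Char),
    (PySem.Chars.join [' '] (p :: ps)).length = ((p :: ps).map List.length).sum + ps.length := by
  intro ps
  induction ps with
  | nil => intro p; simp [PySem.Chars.join_singleton]
  | cons q qs ih =>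
    intro p
    rw [PySem.Chars.join_cons_cons, List.length_append, List.length_append, ih q]
    simp only [List.map_cons, List.sum_cons, List.length_cons, List.length_nil]
    omega

theorem sum_map_len_cast (l : List String) :
    (l.map PySem.Str.len).sum = (((l.map String.toList).map List.length).sum : Int) := by
  induction l with
  | nil => simp
  | cons v vs ih =>
    simp only [List.map_cons, List.sum_cons, ih, PySem.Str.len_eq]
    push_cast
    ring

theorem join_len_take (words : List String) (m : Nat) (h1 : 1 ≤ m) (h2 : m ≤ words.length) :
    PySem.Str.len (PySem.Str.join " " (words.take m))
      = (pvCuml (words.map PySem.Str.len) 0).getD (m - 1) 0 := by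
  cases hw : words.take m with
  | nil =>
    have : (words.take m).length = m := by simp [h2]
    rw [hw] at this
    simp at this
    omega
  | cons v vs =>
    have hlenvs : vs.length = m - 1 := by
      have : (words.take m).length = m := by simp [h2]
      rw [hw] at this
      simp at this
      omega
    have hsep : (" " : String).toList = [' '] := by decide
    rw [pvCuml_getD (words.map PySem.Str.len) 0 (m - 1) (by simp only [List.length_map]; omega),
      show m - 1 + 1 = m by omega, ← List.map_take, hw]
    rw [PySem.Str.len_eq, PySem.Str.toList_join, hsep]
    simp only [List.map_cons]
    rw [cjoin_len ((vs.map String.toList)) v.toList]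
    have hcast := sum_map_len_cast (v :: vs)
    simp only [List.map_cons, List.sum_cons, PySem.Str.len_eq, List.length_map] at hcast ⊢
    push_cast at hcast ⊢
    omega

theorem join_one (w : String) : PySem.Str.join " " [w] = w := by
  rw [← String.toList_inj, PySem.Str.toList_join]
  rw [show (" " : String).toList = [' '] by decide]
  simp [PySem.Chars.join_singleton]

-- strings of different lengths differ
theorem len_ne_imp_ne {a b : String} (h : PySem.Str.len a ≠ PySem.Str.len b) : a ≠ b := by
  intro he; exact h (by rw [he])

-- nonnegative word lengths, packaged
theorem lens_nonneg (words : List String) : ∀ l ∈ words.map PySem.Str.len, 0 ≤ l := by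
  intro l hl
  simp only [List.mem_map] at hl
  obtain ⟨s, _, rfl⟩ := hl
  exact strLen_nonneg s

-- B's kept count at a cons input, named for reuse
theorem mB_eq_search (w : String) (ws : List String) (limit : Int) :
    truncBsearch (truncBjoined (w :: ws) (-1)) limit (truncBjoined (w :: ws) (-1)).length 0
        (truncBjoined (w :: ws) (-1)).length
      = ((pvCuml ((w :: ws).map PySem.Str.len) 0).filter (fun x => decide (x ≤ limit))).length := by
  rw [truncBjoined_eq]
  norm_num
  exact search_eq_count _ limit (pvCuml_pairwise _ 0 (lens_nonneg (w :: ws)))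

-- when the first word's length is exactly limit, B keeps exactly one word
theorem m_one (w : String) (ws : List String) (limit : Int)
    (h0 : PySem.Str.len w = limit) :
    ((pvCuml ((w :: ws).map PySem.Str.len) 0).filter (fun x => decide (x ≤ limit))).length = 1 := by
  have htail : (pvCuml (ws.map PySem.Str.len) (PySem.Str.len w + 1)).filter
      (fun x => decide (x ≤ limit)) = [] := by
    rw [List.filter_eq_nil_iff]
    intro y hy
    have := pvCuml_mem_ge (ws.map PySem.Str.len) (PySem.Str.len w + 1) y (lens_nonneg ws) hy
    simp only [decide_eq_true_eq]
    omega
  simp only [List.map_cons, pvCuml, zero_add]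
  rw [List.filter_cons_of_pos (by rw [h0]; simp), htail]
  simp

-- A's output at a cons input whose first word has length ≥ limit: the raw slice
theorem gA_zero (w : String) (ws : List String) (limit : Int)
    (h0 : limit ≤ PySem.Str.len w) : gA limit (w :: ws) = 0 := by
  rw [gA, if_pos (by omega)]

-- the character list of the first word of split₀
theorem first_word_chars (title : String) (w : String) (ws : List String)
    (hws : PySem.Str.split₀ title = w :: ws) :
    ∃ t, PySem.Chars.split₀ title.toList = w.toList :: t ∧
      w.toList ≠ [] ∧ ∀ c ∈ w.toList, PySem.Chars.isspace c = false := by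
  have h := hws
  unfold PySem.Str.split₀ at h
  cases hc : PySem.Chars.split₀ title.toList with
  | nil => rw [hc] at h; simp at h
  | cons cw t =>
    rw [hc] at h
    simp only [List.map_cons, List.cons.injEq] at h
    obtain ⟨hw, _⟩ := h
    have hwl : w.toList = cw := by rw [← hw, String.toList_ofList]
    have hprops := split0_words title.toList cw (by rw [hc]; simp)
    exact ⟨t, by rw [hwl], by rw [hwl]; exact hprops.1, by rw [hwl]; exact hprops.2⟩

-- ===== VERDICT =====
theorem truncate_title_spec : Claim_unchanged_truncate_title := by
  unfold Claim_unchanged_truncate_title Spec_truncate_title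
  intro title limit _ hD
  simp only [truncate_title, truncate_title_alt]
  by_cases hlen : PySem.Str.len title ≤ limit
  · rw [if_pos hlen, if_pos hlen]
  · rw [if_neg hlen, if_neg hlen]
    have hlt : limit < PySem.Str.len title := by omega
    cases hws : PySem.Str.split₀ title with
    | nil =>
      simp [truncAloop, truncBjoined, truncBsearch]
    | cons w ws =>
      set J := pvCuml ((w :: ws).map PySem.Str.len) 0 with hJdef
      have hJlen : J.length = ws.length + 1 := by rw [hJdef, pvCuml_length]; simp
      have hJ0w : J.getD 0 0 = PySem.Str.len w := by
        rw [hJdef]; simp only [List.map_cons, pvCuml, zero_add, List.getD_cons_zero]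
      -- a D_ membership certificate from a J-indexed dead-zone hit
      have hmem : ∀ k : Nat, k < ws.length + 1 →
          limit - min (k : Int) 1 ≤ J.getD k 0 → J.getD k 0 ≤ limit →
          (k ≠ 0 ∨ PySem.Chars.isspace (title.toList.headD 'a') = true) →
          D_truncate_title title limit := by
        intro k hk h1 h2 h3
        refine ⟨hlt, k, by rw [hws]; simpa using hk, ?_, h3⟩
        rw [Set.mem_Icc, hws]
        rw [hJdef, pvCuml_getD ((w :: ws).map PySem.Str.len) 0 k
          (by simp only [List.length_map]; simpa using hk)] at h1 h2
        simp only [zero_add, ← List.map_take] at h1 h2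
        exact ⟨h1, h2⟩
      have hnok : ∀ k : Nat, 1 ≤ k → k < ws.length + 1 →
          ¬(limit - 1 ≤ J.getD k 0 ∧ J.getD k 0 ≤ limit) := by
        intro k hk1 hk2 ⟨h1, h2⟩
        exact hD (hmem k hk2 (by simpa [show min (k : Int) 1 = 1 by omega] using h1) h2
          (Or.inl (by omega)))
      by_cases hJ0 : J.getD 0 0 = limit
      · -- first word exactly limit long, and (from ¬D_) no leading whitespace:
        -- A's raw slice IS the first word
        have hnsp : PySem.Chars.isspace (title.toList.headD 'a') = false := by
          rcases hbool : PySem.Chars.isspace (title.toList.headD 'a') with _ | _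
          · rfl
          · exact absurd (hmem 0 (by omega) (by rw [hJ0]; omega) (by rw [hJ0]) (Or.inr hbool)) hD
        have hL : title.toList ≠ [] := by
          intro hnil
          have hlen0 : PySem.Str.len title = 0 := by rw [PySem.Str.len_eq, hnil]; simp
          have := strLen_nonneg w
          omega
        obtain ⟨c, rest, hcr⟩ := List.exists_cons_of_ne_nil hL
        have hcsp : PySem.Chars.isspace c = false := by
          rw [hcr] at hnsp; simpa using hnsp
        obtain ⟨t, hfw, hwne, _⟩ := first_word_chars title w ws hws
        obtain ⟨t', hsp0⟩ := split0_first c rest hcsp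
        rw [hcr] at hfw
        rw [hsp0] at hfw
        have hwtl : w.toList = (c :: rest).takeWhile (fun c => !PySem.Chars.isspace c) := by
          exact (List.cons.injEq _ _ _ _ ▸ hfw).1.symm
        -- slice = w
        have hslice : PySem.Str.slice title none (some limit) = w := by
          rw [← String.toList_inj, PySem.Str.toList_slice, PySem.Chars.slice_eq_listSlice]
        -- length facts
          have hlw : PySem.Str.len w = limit := by omega
          have hnonneg : (0:Int) ≤ limit := by
            have := strLen_nonneg w; omega
          rw [PySem.List.slice_to _ hnonneg]
          have hwlen : w.toList.length = limit.toNat := by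
            have := PySem.Str.len_eq w
            omega
          have hpre : w.toList <+: title.toList := by
            rw [hwtl, hcr]
            exact List.takeWhile_prefix _
          rw [← hwlen]
          exact (List.prefix_iff_eq_take.mp hpre).symm
        -- A keeps nothing, B keeps exactly the first word
        rw [truncA_out, gA_zero w ws limit (by omega), mB_eq_search, m_one w ws limit (by omega)]
        simp only [List.take_zero, List.take_succ_cons]
        rw [if_neg (show ¬(([] : List String) ≠ []) by simp), if_pos (show (1:Nat) ≠ 0 by simp),
          join_one]
        exact hslice
      · have hcnt := counts_eq limit w ws (by rw [← hJdef]; exact hJ0) (by rw [← hJdef]; exact hnok)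
        rw [truncA_out, hcnt, mB_eq_search, ← hJdef]
        set m := (J.filter (fun x => decide (x ≤ limit))).length with hm
        rcases Nat.eq_zero_or_pos m with hz | hp
        · simp [hz]
        · have htk : (w :: ws).take m ≠ [] := by
            cases hmc : m with
            | zero => omega
            | succ k => simp
          rw [if_pos htk, if_pos (by omega)]

theorem truncate_title_changed : Claim_changed_truncate_title := by
  unfold Claim_changed_truncate_title; decide

theorem truncate_title_tight : Claim_exact_truncate_title := by
  unfold Claim_exact_truncate_title
  intro title limit _ hD heq
  obtain ⟨hlt, k, hk, hzone, hsp⟩ := hD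
  rw [Set.mem_Icc] at hzone
  simp only [truncate_title, truncate_title_alt, if_neg (show ¬ PySem.Str.len title ≤ limit by omega)] at heq
  cases hws : PySem.Str.split₀ title with
  | nil => rw [hws] at hk; simp at hk
  | cons w ws =>
    rw [hws] at heq hk hzone
    set J := pvCuml ((w :: ws).map PySem.Str.len) 0 with hJdef
    have hnn := lens_nonneg (w :: ws)
    have hpw : J.Pairwise (· < ·) := pvCuml_pairwise _ 0 hnn
    have hJlen : J.length = ws.length + 1 := by rw [hJdef, pvCuml_length]; simp
    have hkJ : k < J.length := by rw [hJlen]; simpa using hk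
    have hJ0w : J.getD 0 0 = PySem.Str.len w := by
      rw [hJdef]; simp only [List.map_cons, pvCuml, zero_add, List.getD_cons_zero]
    -- restate the zone over J
    have hzJ : limit - min (k : Int) 1 ≤ J.getD k 0 ∧ J.getD k 0 ≤ limit := by
      rw [hJdef, pvCuml_getD _ _ _ (by rw [List.length_map]; simpa using hk)]
      simp only [zero_add, ← List.map_take]
      exact hzone
    obtain ⟨hf1, hf2, hf3⟩ := filter_count_facts limit J hpw
    set m := (J.filter (fun x => decide (x ≤ limit))).length with hm
    have hmk : k + 1 ≤ m := by
      by_contra hc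
      have := hf3 (by omega)
      have hmono := pairwise_getD_mono J hpw (show m ≤ k by omega) hkJ
      omega
    rw [truncA_out, mB_eq_search, ← hJdef, ← hm] at heq
    by_cases hk0 : k = 0
    · -- single word exactly limit long, title starts with whitespace
      subst hk0
      have hspc : PySem.Chars.isspace (title.toList.headD 'a') = true := by
        rcases hsp with h | h
        · omega
        · exact h
      have hJ0 : J.getD 0 0 = limit := by
        have : min ((0:Nat) : Int) 1 = 0 := by simp
        omega
      obtain ⟨t, hfw, hwne, hwchars⟩ := first_word_chars title w ws hws
      have hL : title.toList ≠ [] := by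
        intro hnil
        have hlen0 : PySem.Str.len title = 0 := by rw [PySem.Str.len_eq, hnil]; simp
        have := strLen_nonneg w
        omega
      obtain ⟨c, rest, hcr⟩ := List.exists_cons_of_ne_nil hL
      have hcsp : PySem.Chars.isspace c = true := by
        rw [hcr] at hspc; simpa using hspc
      rw [gA_zero w ws limit (by omega),
        show m = 1 from by rw [hm, hJdef]; exact m_one w ws limit (by omega)] at heq
      simp only [List.take_zero, List.take_succ_cons] at heq
      rw [if_neg (show ¬(([] : List String) ≠ []) by simp), if_pos (show (1:Nat) ≠ 0 by simp),
        join_one] at heq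
      -- heq : slice = w ; but the slice starts with whitespace and w does not
      have hlim1 : (1:Int) ≤ limit := by
        have : 1 ≤ w.toList.length := by
          cases hwl : w.toList with
          | nil => exact absurd hwl hwne
          | cons _ _ => simp
        have := PySem.Str.len_eq w
        omega
      have hslicetl : (PySem.Str.slice title none (some limit)).toList
          = title.toList.take limit.toNat := by
        rw [PySem.Str.toList_slice, PySem.Chars.slice_eq_listSlice,
          PySem.List.slice_to _ (by omega)]
      have : w.toList = title.toList.take limit.toNat := by
        rw [← hslicetl, heq]
      rw [hcr, show limit.toNat = (limit.toNat - 1) + 1 by omega, List.take_succ_cons] at this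
      have hcw : c ∈ w.toList := by rw [this]; simp
      have hfalse := hwchars c hcw
      rw [hfalse] at hcsp
      exact Bool.false_ne_true hcsp
    · -- k ≥ 1 : both keep at least a word, B keeps strictly more
      have hk1 : 1 ≤ k := by omega
      have hzk : limit - 1 ≤ J.getD k 0 ∧ J.getD k 0 ≤ limit := by
        have : min ((k:Nat) : Int) 1 = 1 := by
          simp only [min_eq_right_iff]
          exact_mod_cast hk1
        omega
      -- A keeps at least one word
      have hJ0lt : J.getD 0 0 < limit := by
        have := pairwise_getD_strict J hpw (show 0 < k by omega) hkJ
        omega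
      have hga1 : 1 ≤ gA limit (w :: ws) := by
        rw [gA, if_neg (by omega)]
        omega
      -- A keeps fewer than m words
      set g := gA limit (w :: ws) with hg
      have hgm : g < m := by
        by_contra hc
        have hm2 : 2 ≤ m := by omega
        have hmm1 : 1 ≤ m - 1 ∧ m - 1 < g := by omega
        -- J[m-1] ≤ limit - 2 from A's greedy facts, but J[m-1] ≥ limit - 1
        obtain ⟨t1, t2, t3⟩ := gcnt_facts limit ws (PySem.Str.len w + 1)
        have hgdef : g = gcnt limit ws (PySem.Str.len w + 1) + 1 := by
          rw [hg, gA, if_neg (by omega)]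
        have hJget : ∀ i : Nat, J.getD (i + 1) 0
            = (pvCuml (ws.map PySem.Str.len) (PySem.Str.len w + 1)).getD i 0 := by
          intro i
          rw [hJdef]
          simp only [List.map_cons, pvCuml, zero_add, List.getD_cons_succ]
        have ht2 := t2 (m - 2) (by omega)
        rw [← hJget (m - 2), show m - 2 + 1 = m - 1 by omega] at ht2
        have hge := hf2 (m - 1) (by omega)
        have hmono := pairwise_getD_mono J hpw (show k ≤ m - 1 by omega) (by omega)
        omega
      -- outputs are joins of different word counts: lengths differ
      have htkg : (w :: ws).take g ≠ [] := by
        cases hgc : g with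
        | zero => omega
        | succ _ => simp
      rw [if_pos htkg, if_pos (by omega)] at heq
      have hlg := join_len_take (w :: ws) g hga1 (by
        rw [hg, gA]
        split_ifs with hcond
        · omega
        · have := (gcnt_facts limit ws (PySem.Str.len w + 1)).1
          simp only [List.length_cons]
          omega)
      have hlm := join_len_take (w :: ws) m (by omega) (by
        have := hf1
        rw [hJlen] at this
        simpa using this)
      rw [← hJdef] at hlg hlm
      have hstrict := pairwise_getD_strict J hpw (show g - 1 < m - 1 by omega)
        (by omega)
      exact len_ne_imp_ne (by rw [hlg, hlm]; omega) heq
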